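-- pv_equiv track=rewrite | github.com/naturalsolutions/ecoReleve-Data | Back/ecoreleve_server/modules/sensors/sensor_data/sensor_data_resource.py | strToXML
-- ===== SOURCE A (Python) =====
-- def strToXML(strVal):
--     listTags = strVal.split(",")
--     XMLTags = None
--     if len(listTags) > 0 :
--         XMLTags = "<TAGS>"
--         for tag in listTags :
--             XMLTags += "<TAG>" + str(tag) + "</TAG>"
--         XMLTags += "</TAGS>"
--     return XMLTags
-- ===== SOURCE B (Python) =====
-- def strToXML(strVal):
--     return "<TAGS><TAG>" + strVal.replace(",", "</TAG><TAG>") + "</TAG></TAGS>"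
-- ===== Notes on version B (the rewrite author's own statement) =====
-- stated objective: idiomatic
-- what changed: Replaces the split-then-loop-and-wrap construction with a single str.replace that turns each comma into a closing-plus-opening tag pair between fixed outer literals.
import Mathlib
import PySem

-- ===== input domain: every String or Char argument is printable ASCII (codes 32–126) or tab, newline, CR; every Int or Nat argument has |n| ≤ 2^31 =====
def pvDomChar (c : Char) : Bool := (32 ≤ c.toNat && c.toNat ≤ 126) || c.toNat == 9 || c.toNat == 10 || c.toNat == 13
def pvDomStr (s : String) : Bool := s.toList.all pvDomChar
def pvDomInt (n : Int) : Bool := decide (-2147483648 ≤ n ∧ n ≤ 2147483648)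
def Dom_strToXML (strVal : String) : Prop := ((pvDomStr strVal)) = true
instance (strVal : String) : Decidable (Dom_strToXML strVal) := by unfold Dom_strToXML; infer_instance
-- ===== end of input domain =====

-- B replaces A's split-then-loop wrapping with a single str.replace between fixed outer literals (idiomatic, same cost).

-- ===== PORT A =====
def strToXML (strVal : String) : Option String :=
  match PySem.Str.split? strVal "," with
  | none => none  -- unreachable: the separator "," is nonempty, so split never raises
  | some listTags =>
    if listTags.length > 0 then
      some ((listTags.foldl (fun acc tag => acc ++ ("<TAG>" ++ tag ++ "</TAG>")) "<TAGS>") ++ "</TAGS>")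
    else none

-- ===== PORT B =====
def strToXML_alt (strVal : String) : Option String :=
  some ("<TAGS><TAG>" ++ PySem.Str.replace strVal "," "</TAG><TAG>" ++ "</TAG></TAGS>")

-- ===== PRECONDITION & SPEC =====
def Spec_strToXML (strVal : String) (out : Option String) : Prop := out = strToXML_alt strVal
instance (strVal : String) (out : Option String) : Decidable (Spec_strToXML strVal out) := by unfold Spec_strToXML; infer_instance

-- ===== CLAIM (what is proved, stated in full; the proofs are below) =====
def Claim_equal_strToXML : Prop := ∀ (strVal : String), Dom_strToXML strVal → Spec_strToXML strVal (strToXML strVal)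

-- ===== LEMMAS AND PROOFS =====

-- simple recursive characterisation of splitting on a single comma: (first piece, remaining pieces)
def mySplit : List Char → List Char × List (List Char)
  | [] => ([], [])
  | c :: t =>
    if c = ',' then ([], (mySplit t).1 :: (mySplit t).2)
    else (c :: (mySplit t).1, (mySplit t).2)

-- simple recursive characterisation of replacing each comma by `new`
def myRepl (new : List Char) : List Char → List Char
  | [] => []
  | c :: t => if c = ',' then new ++ myRepl new t else c :: myRepl new t

-- wrapping each part in <TAG>…</TAG>, the char-list view of A's loop body
def wrapParts (parts : List (List Char)) : List Char :=
  parts.flatMap (fun p => "<TAG>".toList ++ p ++ "</TAG>".toList)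

lemma splitOn_go_comma : ∀ (fuel : Nat) (l cur : List Char) (acc : List (List Char)),
    l.length ≤ fuel →
    PySem.Chars.splitOn.go [','] fuel l cur acc
      = acc.reverse ++ ((cur.reverse ++ (mySplit l).1) :: (mySplit l).2) := by
  intro fuel
  induction fuel with
  | zero =>
    intro l cur acc h
    have : l = [] := List.length_eq_zero_iff.mp (Nat.le_zero.mp h)
    subst this
    simp [PySem.Chars.splitOn.go, mySplit]
  | succ f ih =>
    intro l cur acc h
    cases l with
    | nil => simp [PySem.Chars.splitOn.go, mySplit]
    | cons c rest =>
      rw [PySem.Chars.splitOn.go]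
      by_cases hc : c = ','
      · subst hc
        simp only [List.isPrefixOf, BEq.rfl, Bool.and_self, if_true, List.length_cons,
          List.drop_succ_cons, List.length_nil, List.drop_zero]
        rw [ih rest [] (cur.reverse :: acc) (by simpa using Nat.lt_succ_iff.mp (by simpa using h))]
        simp [mySplit]
      · have hpre : [','].isPrefixOf (c :: rest) = false := by
          simp [List.isPrefixOf]
          exact fun hh => absurd hh.symm hc
        rw [hpre]
        simp only [if_false, Bool.false_eq_true]
        rw [ih rest (c :: cur) acc (by simpa using Nat.lt_succ_iff.mp (by simpa using h))]
        simp [mySplit, hc]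

lemma replace_go_comma (new : List Char) : ∀ (fuel : Nat) (l acc : List Char),
    l.length ≤ fuel →
    PySem.Chars.replace.go [','] new fuel l acc = acc.reverse ++ myRepl new l := by
  intro fuel
  induction fuel with
  | zero =>
    intro l acc h
    have : l = [] := List.length_eq_zero_iff.mp (Nat.le_zero.mp h)
    subst this
    simp [PySem.Chars.replace.go, myRepl]
  | succ f ih =>
    intro l acc h
    cases l with
    | nil => simp [PySem.Chars.replace.go, myRepl]
    | cons c rest =>
      rw [PySem.Chars.replace.go]
      by_cases hc : c = ','
      · subst hc
        simp only [List.isPrefixOf, BEq.rfl, Bool.and_self, if_true, List.length_cons,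
          List.drop_succ_cons, List.length_nil, List.drop_zero]
        rw [ih rest (new.reverse ++ acc) (Nat.lt_succ_iff.mp (by simpa using h))]
        simp [myRepl]
      · have hpre : [','].isPrefixOf (c :: rest) = false := by
          simp [List.isPrefixOf]
          exact fun hh => absurd hh.symm hc
        rw [hpre]
        simp only [if_false, Bool.false_eq_true]
        rw [ih rest (c :: acc) (Nat.lt_succ_iff.mp (by simpa using h))]
        simp [myRepl, hc]

-- the heart: wrapping all comma-split pieces = replacing each comma by "</TAG><TAG>", between one outer tag pair
lemma main_char (cs : List Char) :
    (mySplit cs).1 ++ "</TAG>".toList ++ wrapParts (mySplit cs).2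
      = myRepl "</TAG><TAG>".toList cs ++ "</TAG>".toList := by
  induction cs with
  | nil => simp [mySplit, myRepl, wrapParts]
  | cons c t ih =>
    by_cases hc : c = ','
    · subst hc
      simp [wrapParts, List.append_assoc] at ih
      simp [mySplit, myRepl, wrapParts, List.append_assoc, ih]
    · simp [wrapParts, List.append_assoc] at ih
      simp [mySplit, myRepl, wrapParts, hc, List.append_assoc, ih]

lemma splitOn_comma (cs : List Char) :
    PySem.Chars.splitOn cs [','] = (mySplit cs).1 :: (mySplit cs).2 := by
  unfold PySem.Chars.splitOn
  rw [splitOn_go_comma (cs.length + 1) cs [] [] (Nat.le_succ _)]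
  simp

lemma replace_comma (cs new : List Char) :
    PySem.Chars.replace cs [','] new = myRepl new cs := by
  unfold PySem.Chars.replace
  rw [if_neg (by simp)]
  rw [replace_go_comma new cs.length cs [] (le_refl _)]
  simp

lemma foldA (parts : List String) : ∀ init : String,
    (parts.foldl (fun acc tag => acc ++ ("<TAG>" ++ tag ++ "</TAG>")) init).toList
      = init.toList ++ wrapParts (parts.map String.toList) := by
  induction parts with
  | nil => intro init; simp [wrapParts]
  | cons p ps ih =>
    intro init
    simp only [List.foldl_cons, List.map_cons, wrapParts, List.flatMap_cons] at *
    rw [ih]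
    simp [List.append_assoc]

-- ===== VERDICT (by name: the statement is the Claim_ definition above) =====
theorem strToXML_spec : Claim_equal_strToXML := by
  intro s _
  unfold Spec_strToXML strToXML strToXML_alt
  rw [show PySem.Str.split? s "," = some (((mySplit s.toList).1 :: (mySplit s.toList).2).map String.ofList) by
    simp [PySem.Str.split?, PySem.Chars.split?, splitOn_comma]]
  show (if (0:Nat) < _ then _ else _) = _
  rw [if_pos (by simp)]
  congr 1
  apply String.toList_inj.mp
  simp only [String.toList_append, foldA, List.map_map]
  rw [show PySem.Str.replace s "," "</TAG><TAG>" = String.ofList (myRepl "</TAG><TAG>".toList s.toList) by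
    apply String.toList_inj.mp
    simp [replace_comma]]
  have h2 := congrArg (fun l => l ++ ['<','/','T','A','G','S','>']) (main_char s.toList)
  simp [wrapParts, List.append_assoc] at h2 ⊢
  simp [Function.comp_def, String.toList_ofList, h2]
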